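-- pv_equiv track=rewrite | github.com/Mcusac/kaggle-ml-comp-scripts | scripts/layers/layer_1_competition/level_0_infra/level_0/grid_ops.py | cell_match_counts
-- ===== SOURCE A (Python) =====
-- def cell_match_counts(
--     pred: list[list[int]],
--     truth: list[list[int]],
-- ) -> tuple[int, int]:
--     """Return (total_cells_compared, correct_cells)."""
--     if pred == truth:
--         t = sum(len(r) for r in truth)
--         return t, t
--     total = correct = 0
--     for pr, tr in zip(pred, truth):
--         for pc, tc in zip(pr, tr):
--             total += 1
--             if pc == tc:
--                 correct += 1
--     return total, correct
-- ===== SOURCE B (Python) =====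
-- def cell_match_counts(
--     pred: list[list[int]],
--     truth: list[list[int]],
-- ) -> tuple[int, int]:
--     """Return (total_cells_compared, correct_cells)."""
--     rows = list(zip(pred, truth))
--     width = 0
--     for pr, tr in rows:
--         width = max(width, min(len(pr), len(tr)))
--     total = correct = 0
--     for j in range(width):
--         for pr, tr in rows:
--             if j < len(pr) and j < len(tr):
--                 total += 1
--                 if pr[j] == tr[j]:
--                     correct += 1
--     return total, correct
-- ===== Notes on version B (the rewrite author's own statement) =====
-- stated objective: alternative
-- what changed: Replaces A's row-major zip loop (with its pred==truth early exit) by a column-major traversal: a first pass computes the grid width as the running max of per-row comparable lengths, then an outer loop over column indices scans all rows per column, counting cells by index access with an in-bounds guard.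
import Mathlib
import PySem

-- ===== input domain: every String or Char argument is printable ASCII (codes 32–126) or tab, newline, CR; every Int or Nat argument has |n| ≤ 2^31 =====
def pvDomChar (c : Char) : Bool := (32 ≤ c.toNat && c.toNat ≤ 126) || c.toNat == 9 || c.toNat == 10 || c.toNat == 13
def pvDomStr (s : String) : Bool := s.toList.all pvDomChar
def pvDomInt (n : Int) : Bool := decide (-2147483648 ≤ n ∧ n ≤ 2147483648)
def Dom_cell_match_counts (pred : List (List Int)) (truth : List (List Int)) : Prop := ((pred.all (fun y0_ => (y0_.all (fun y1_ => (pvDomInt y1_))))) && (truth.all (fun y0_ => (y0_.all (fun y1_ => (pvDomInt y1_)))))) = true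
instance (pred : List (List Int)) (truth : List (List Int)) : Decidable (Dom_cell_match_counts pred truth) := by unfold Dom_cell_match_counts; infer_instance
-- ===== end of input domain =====

-- B replaces A's row-major zip loop (and its pred==truth early exit) by a column-major
-- traversal: width = running max of comparable row lengths, then per column scan all rows.

-- ===== PORT A =====
def cell_match_counts (pred : List (List Int)) (truth : List (List Int)) : Int × Int :=
  if pred == truth then
    let t : Int := (truth.map (fun r => (r.length : Int))).sum
    (t, t)
  else
    (pred.zip truth).foldl (fun acc prtr =>
      (prtr.1.zip prtr.2).foldl (fun (tc : Int × Int) pctc =>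
        (tc.1 + 1, if pctc.1 == pctc.2 then tc.2 + 1 else tc.2)) acc) ((0 : Int), (0 : Int))

-- ===== PORT B =====
-- pr[j] / tr[j] with the guard j < len ensuring in-range: ported exactly as PySem.List.pyGet?
-- (option equality coincides with Python's element equality when both indices are in range).
def cell_match_counts_alt (pred : List (List Int)) (truth : List (List Int)) : Int × Int :=
  let rows := pred.zip truth
  let width : Int := rows.foldl (fun acc pt => max acc ((min pt.1.length pt.2.length : Nat) : Int)) 0
  (PySem.List.pyRange 0 width 1).foldl (fun acc j =>
    rows.foldl (fun (acc : Int × Int) pt =>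
      if j < (pt.1.length : Int) ∧ j < (pt.2.length : Int) then
        (acc.1 + 1,
         if PySem.List.pyGet? pt.1 j == PySem.List.pyGet? pt.2 j then acc.2 + 1 else acc.2)
      else acc) acc) ((0 : Int), (0 : Int))

-- ===== PRECONDITION & SPEC =====
def Spec_cell_match_counts (pred : List (List Int)) (truth : List (List Int)) (out : Int × Int) : Prop := out = cell_match_counts_alt pred truth
instance (pred : List (List Int)) (truth : List (List Int)) (out : Int × Int) : Decidable (Spec_cell_match_counts pred truth out) := by unfold Spec_cell_match_counts; infer_instance

-- ===== CLAIM (what is proved, stated in full; the proofs are below) =====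
def Claim_equal_cell_match_counts : Prop := ∀ (pred : List (List Int)) (truth : List (List Int)), Dom_cell_match_counts pred truth → Spec_cell_match_counts pred truth (cell_match_counts pred truth)

-- ===== LEMMAS AND PROOFS =====

-- row quantities: comparable cells and matches of one row pair
def pvN (pt : List Int × List Int) : Int := ((min pt.1.length pt.2.length : Nat) : Int)
def pvM (pt : List Int × List Int) : Int :=
  ((pt.1.zip pt.2).map (fun c => if c.1 == c.2 then (1 : Int) else 0)).sum

-- column-j contributions of one row pair
def pvG1 (j : Int) (pt : List Int × List Int) : Int :=
  if j < (pt.1.length : Int) ∧ j < (pt.2.length : Int) then 1 else 0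
def pvG2 (j : Int) (pt : List Int × List Int) : Int :=
  if j < (pt.1.length : Int) ∧ j < (pt.2.length : Int) then
    (if PySem.List.pyGet? pt.1 j == PySem.List.pyGet? pt.2 j then 1 else 0) else 0

-- a loop adding a pair per element is a pair of sums
lemma foldl_pair_add {α : Type} (l : List α) (F G : α → Int) (a b : Int) :
    l.foldl (fun acc x => (acc.1 + F x, acc.2 + G x)) (a, b)
      = (a + (l.map F).sum, b + (l.map G).sum) := by
  rw [PySem.List.foldl_prod_mk (f := fun acc x => acc + F x) (g := fun acc x => acc + G x),
    PySem.List.foldl_add, PySem.List.foldl_add]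

-- A's inner loop from accumulator acc
lemma inner_loop_eq (l : List (Int × Int)) (acc : Int × Int) :
    l.foldl (fun (tc : Int × Int) pctc =>
        (tc.1 + 1, if pctc.1 == pctc.2 then tc.2 + 1 else tc.2)) acc
    = (acc.1 + (l.length : Int), acc.2 + (l.map (fun c => if c.1 == c.2 then (1 : Int) else 0)).sum) := by
  induction l generalizing acc with
  | nil => simp
  | cons h t ih =>
      rw [List.foldl_cons, ih]
      simp only [List.length_cons, List.map_cons, List.sum_cons, Prod.mk.injEq]
      constructor <;> [push_cast; split] <;> ring

-- A's outer loop computes the row-major pair of sums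
lemma outer_loop_eq (l : List (List Int × List Int)) (acc : Int × Int) :
    l.foldl (fun acc prtr =>
      (prtr.1.zip prtr.2).foldl (fun (tc : Int × Int) pctc =>
        (tc.1 + 1, if pctc.1 == pctc.2 then tc.2 + 1 else tc.2)) acc) acc
    = (acc.1 + (l.map pvN).sum, acc.2 + (l.map pvM).sum) := by
  induction l generalizing acc with
  | nil => simp
  | cons h t ih =>
      rw [List.foldl_cons, inner_loop_eq, ih]
      simp only [List.map_cons, List.sum_cons, List.length_zip, Prod.mk.injEq, pvN, pvM]
      constructor <;> ring

-- B's inner loop (one column) from accumulator acc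
lemma col_loop_eq (rows : List (List Int × List Int)) (j : Int) (acc : Int × Int) :
    rows.foldl (fun (acc : Int × Int) pt =>
      if j < (pt.1.length : Int) ∧ j < (pt.2.length : Int) then
        (acc.1 + 1,
         if PySem.List.pyGet? pt.1 j == PySem.List.pyGet? pt.2 j then acc.2 + 1 else acc.2)
      else acc) acc
    = (acc.1 + (rows.map (pvG1 j)).sum, acc.2 + (rows.map (pvG2 j)).sum) := by
  have h : ∀ (acc : Int × Int) pt, pt ∈ rows →
      (if j < (pt.1.length : Int) ∧ j < (pt.2.length : Int) then
        ((acc.1 + 1 : Int),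
         if PySem.List.pyGet? pt.1 j == PySem.List.pyGet? pt.2 j then acc.2 + 1 else acc.2)
      else acc)
      = (acc.1 + pvG1 j pt, acc.2 + pvG2 j pt) := by
    intro acc pt _
    unfold pvG1 pvG2
    split_ifs <;> simp
  obtain ⟨a, b⟩ := acc
  rw [PySem.List.foldl_congr_mem rows _
    (fun (acc : Int × Int) pt => (acc.1 + pvG1 j pt, acc.2 + pvG2 j pt)) (a, b) (h)]
  exact foldl_pair_add rows (pvG1 j) (pvG2 j) a b

-- B's outer loop is the column-major pair of sums
lemma b_loops_eq (rows : List (List Int × List Int)) (w : Int) :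
    (PySem.List.pyRange 0 w 1).foldl (fun acc j =>
      rows.foldl (fun (acc : Int × Int) pt =>
        if j < (pt.1.length : Int) ∧ j < (pt.2.length : Int) then
          (acc.1 + 1,
           if PySem.List.pyGet? pt.1 j == PySem.List.pyGet? pt.2 j then acc.2 + 1 else acc.2)
        else acc) acc) ((0 : Int), (0 : Int))
    = (((PySem.List.pyRange 0 w 1).map (fun j => (rows.map (pvG1 j)).sum)).sum,
       ((PySem.List.pyRange 0 w 1).map (fun j => (rows.map (pvG2 j)).sum)).sum) := by
  have h : ∀ (acc : Int × Int) (j : Int), j ∈ PySem.List.pyRange 0 w 1 →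
      rows.foldl (fun (acc : Int × Int) pt =>
        if j < (pt.1.length : Int) ∧ j < (pt.2.length : Int) then
          (acc.1 + 1,
           if PySem.List.pyGet? pt.1 j == PySem.List.pyGet? pt.2 j then acc.2 + 1 else acc.2)
        else acc) acc
      = (acc.1 + (rows.map (pvG1 j)).sum, acc.2 + (rows.map (pvG2 j)).sum) := by
    intro acc j _; exact col_loop_eq rows j acc
  rw [PySem.List.foldl_congr_mem (PySem.List.pyRange 0 w 1) _
    (fun (acc : Int × Int) j => (acc.1 + (rows.map (pvG1 j)).sum, acc.2 + (rows.map (pvG2 j)).sum))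
    ((0 : Int), (0 : Int)) (h)]
  rw [foldl_pair_add (PySem.List.pyRange 0 w 1)
    (fun j => (rows.map (pvG1 j)).sum) (fun j => (rows.map (pvG2 j)).sum) 0 0]
  simp

-- exchange the two summations
lemma sum_swap {ρ : Type} (J : List Int) (R : List ρ) (F : Int → ρ → Int) :
    (J.map (fun j => (R.map (F j)).sum)).sum = (R.map (fun r => (J.map (fun j => F j r)).sum)).sum := by
  induction J with
  | nil => simp
  | cons j J ih =>
      simp only [List.map_cons, List.sum_cons, ih]
      rw [PySem.List.sum_map_add_int]

-- index-sum of matches over range(min len) equals the zip sum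
lemma idx_eq_zip (a b : List Int) :
    ((List.range (min a.length b.length)).map
        (fun k => if a[k]? == b[k]? then (1 : Int) else 0)).sum
    = ((a.zip b).map (fun c => if c.1 == c.2 then (1 : Int) else 0)).sum := by
  induction a generalizing b with
  | nil => simp
  | cons x a ih =>
      cases b with
      | nil => simp
      | cons y b =>
          simp only [List.length_cons, Nat.succ_min_succ, List.range_succ_eq_map,
            List.map_cons, List.map_map, List.sum_cons, List.zip_cons_cons]
          rw [← ih b]
          congr 1

-- per-row column sums collapse to pvN / pvM when the row fits in the width
lemma col_sum_n (pt : List Int × List Int) (w : Int) (hw : pvN pt ≤ w) :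
    ((PySem.List.pyRange 0 w 1).map (fun j => pvG1 j pt)).sum = pvN pt := by
  have h0 : (0 : Int) ≤ pvN pt := by unfold pvN; positivity
  rw [PySem.List.pyRange_one_append 0 (pvN pt) w h0 hw, List.map_append, List.sum_append]
  have h1 : ((PySem.List.pyRange 0 (pvN pt) 1).map (fun j => pvG1 j pt)).sum
      = ((PySem.List.pyRange 0 (pvN pt) 1).map (fun _ => (1 : Int))).sum := by
    apply congrArg; apply List.map_congr_left
    intro j hj
    rw [PySem.List.mem_pyRange_one] at hj
    unfold pvG1 pvN at *
    rw [if_pos (by omega)]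
  have h2 : ((PySem.List.pyRange (pvN pt) w 1).map (fun j => pvG1 j pt)).sum = 0 := by
    have : ((PySem.List.pyRange (pvN pt) w 1).map (fun j => pvG1 j pt))
        = (PySem.List.pyRange (pvN pt) w 1).map (fun _ => (0 : Int)) := by
      apply List.map_congr_left
      intro j hj
      rw [PySem.List.mem_pyRange_one] at hj
      unfold pvG1 pvN at *
      rw [if_neg (by omega)]
    simp [this]
  rw [h1, h2, PySem.List.sum_map_const_int, PySem.List.length_pyRange_one]
  unfold pvN at *
  omega

lemma col_sum_m (pt : List Int × List Int) (w : Int) (hw : pvN pt ≤ w) :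
    ((PySem.List.pyRange 0 w 1).map (fun j => pvG2 j pt)).sum = pvM pt := by
  have h0 : (0 : Int) ≤ pvN pt := by unfold pvN; positivity
  rw [PySem.List.pyRange_one_append 0 (pvN pt) w h0 hw, List.map_append, List.sum_append]
  have h2 : ((PySem.List.pyRange (pvN pt) w 1).map (fun j => pvG2 j pt)).sum = 0 := by
    have : ((PySem.List.pyRange (pvN pt) w 1).map (fun j => pvG2 j pt))
        = (PySem.List.pyRange (pvN pt) w 1).map (fun _ => (0 : Int)) := by
      apply List.map_congr_left
      intro j hj
      rw [PySem.List.mem_pyRange_one] at hj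
      unfold pvG2 pvN at *
      rw [if_neg (by omega)]
    simp [this]
  have h1 : ((PySem.List.pyRange 0 (pvN pt) 1).map (fun j => pvG2 j pt)).sum = pvM pt := by
    rw [PySem.List.pyRange_one]
    have hn : ((pvN pt) - 0).toNat = min pt.1.length pt.2.length := by
      unfold pvN; omega
    rw [hn, List.map_map]
    unfold pvM
    rw [← idx_eq_zip pt.1 pt.2]
    apply congrArg; apply List.map_congr_left
    intro k hk
    rw [List.mem_range] at hk
    simp only [Function.comp, zero_add, pvG2]
    rw [if_pos (by constructor <;> [exact_mod_cast Nat.lt_of_lt_of_le hk (min_le_left _ _);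
        exact_mod_cast Nat.lt_of_lt_of_le hk (min_le_right _ _)])]
    simp [PySem.List.pyGet?_natCast]
  rw [h1, h2]; ring

-- the early-exit value (Σ len, Σ len) equals the row-major sums on (t.zip t)
lemma zip_self_n (t : List (List Int)) :
    ((t.zip t).map pvN).sum = (t.map (fun r => (r.length : Int))).sum := by
  induction t with
  | nil => simp
  | cons h t ih => simp only [List.zip_cons_cons, List.map_cons, List.sum_cons, ih, pvN, Nat.min_self]

lemma zip_self_row (h : List Int) :
    ((h.zip h).map (fun c => if c.1 == c.2 then (1 : Int) else 0)).sum = (h.length : Int) := by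
  induction h with
  | nil => simp
  | cons a b ihh =>
      simp only [List.zip_cons_cons, List.map_cons, List.sum_cons, ihh,
        BEq.rfl, if_true, List.length_cons]
      push_cast; ring

lemma zip_self_m (t : List (List Int)) :
    ((t.zip t).map pvM).sum = (t.map (fun r => (r.length : Int))).sum := by
  induction t with
  | nil => simp
  | cons h t ih => simp only [List.zip_cons_cons, List.map_cons, List.sum_cons, ih, pvM, zip_self_row]

-- B computes the row-major pair of sums
lemma alt_eq_sums (pred truth : List (List Int)) :
    cell_match_counts_alt pred truth
      = (((pred.zip truth).map pvN).sum, ((pred.zip truth).map pvM).sum) := by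
  unfold cell_match_counts_alt
  set rows := pred.zip truth with hrows
  set w : Int := rows.foldl (fun acc pt => max acc ((min pt.1.length pt.2.length : Nat) : Int)) 0 with hw
  have hwmax : ∀ pt ∈ rows, pvN pt ≤ w := by
    intro pt hpt
    have := (PySem.List.le_foldl_max_int rows
      (fun pt => ((min pt.1.length pt.2.length : Nat) : Int)) 0).2 pt hpt
    simpa [pvN, hw] using this
  rw [b_loops_eq rows w]
  rw [sum_swap _ rows pvG1, sum_swap _ rows pvG2]
  rw [Prod.mk.injEq]
  constructor <;> (apply congrArg; apply List.map_congr_left; intro pt hpt)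
  · exact col_sum_n pt w (hwmax pt hpt)
  · exact col_sum_m pt w (hwmax pt hpt)

-- ===== VERDICT (by name: the statement is the Claim_ definition above) =====
theorem cell_match_counts_spec : Claim_equal_cell_match_counts := by
  intro pred truth _
  unfold Spec_cell_match_counts cell_match_counts
  rw [alt_eq_sums]
  split
  · next heq =>
      have : pred = truth := by simpa using heq
      subst this
      rw [zip_self_n, zip_self_m]
  · rw [outer_loop_eq]
    simp
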